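-- pv_equiv track=rewrite | github.com/Siyuan-Li201/Lares | code/code/code_compare/extract_eq.py | split_logical_conditions
-- ===== SOURCE A (Python) =====
-- def split_logical_conditions(condition_str):
--     """将条件字符串按照逻辑运算符（&& 和 ||）分割"""
--     # 首先按照 || 分割
--     or_parts = condition_str.split('||')
--     sub_conditions = []
--
--     # 然后对每个部分按照 && 分割
--     for or_part in or_parts:
--         and_parts = or_part.split('&&')
--         for part in and_parts:
--             # 清理空白字符并添加到结果列表
--             cleaned_part = ' '.join(part.split())
--             if cleaned_part:
--                 sub_conditions.append(cleaned_part)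
--
--     return sub_conditions
-- ===== SOURCE B (Python) =====
-- def split_logical_conditions(condition_str):
--     """One left-to-right scan: cut at every '||' or '&&' occurrence, then clean each piece."""
--     pieces = []
--     cur = []
--     i = 0
--     n = len(condition_str)
--     while i < n:
--         if condition_str[i:i + 2] in ('||', '&&'):
--             pieces.append(cur)
--             cur = []
--             i += 2
--         else:
--             cur.append(condition_str[i])
--             i += 1
--     pieces.append(cur)
--     result = []
--     for p in pieces:
--         cleaned = ' '.join(''.join(p).split())
--         if cleaned:
--             result.append(cleaned)
--     return result
-- ===== Notes on version B (the rewrite author's own statement) =====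
-- stated objective: alternative
-- what changed: Replaces the nested split('||') / split('&&') loops with a single left-to-right scanner that cuts the string at every '||' or '&&' occurrence in one pass, then cleans the pieces in a second flat pass.
import Mathlib
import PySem

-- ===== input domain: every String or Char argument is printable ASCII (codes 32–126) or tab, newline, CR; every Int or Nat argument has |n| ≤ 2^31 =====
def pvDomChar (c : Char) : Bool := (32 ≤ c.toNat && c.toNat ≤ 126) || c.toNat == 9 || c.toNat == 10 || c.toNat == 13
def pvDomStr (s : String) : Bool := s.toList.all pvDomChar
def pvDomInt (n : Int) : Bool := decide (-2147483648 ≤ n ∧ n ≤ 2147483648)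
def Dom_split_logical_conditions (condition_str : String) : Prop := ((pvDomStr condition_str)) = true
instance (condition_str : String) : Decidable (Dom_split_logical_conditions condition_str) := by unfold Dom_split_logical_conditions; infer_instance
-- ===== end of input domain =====

-- B replaces A's nested split('||')/split('&&') passes by one left-to-right scan that cuts at
-- every '||' or '&&' occurrence; same return value (objective: alternative, no speed claim).

-- ===== PORT A =====
-- literal transliteration of A: split on '||', then each part on '&&',
-- clean whitespace with ' '.join(part.split()), append nonempty pieces.
def split_logical_conditions (condition_str : String) : List String :=
  let or_parts := PySem.Chars.splitOn condition_str.toList ['|', '|']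
  or_parts.foldl (fun sub_conditions or_part =>
    (PySem.Chars.splitOn or_part ['&', '&']).foldl (fun sub_conditions part =>
      let cleaned_part := PySem.Chars.join [' '] (PySem.Chars.split₀ part)
      if cleaned_part ≠ [] then sub_conditions ++ [String.ofList cleaned_part]
      else sub_conditions) sub_conditions) []

-- ===== PORT B =====
-- B's while-loop scanner: cur/pieces accumulators; cut on '||' or '&&' (step 2), else copy one char.
def scanPieces : List Char → List Char → List (List Char) → List (List Char)
  | [], cur, pieces => pieces ++ [cur]
  | c1 :: rest, cur, pieces =>
    match rest with
    | c2 :: rest' =>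
      if (c1 = '|' ∧ c2 = '|') ∨ (c1 = '&' ∧ c2 = '&') then
        scanPieces rest' [] (pieces ++ [cur])
      else scanPieces (c2 :: rest') (cur ++ [c1]) pieces
    | [] => scanPieces [] (cur ++ [c1]) pieces
termination_by l _ _ => l.length

-- B's second pass: clean each piece, keep the nonempty ones.
def split_logical_conditions_alt (condition_str : String) : List String :=
  (scanPieces condition_str.toList [] []).filterMap (fun p =>
    let cleaned := PySem.Chars.join [' '] (PySem.Chars.split₀ p)
    if cleaned = [] then none else some (String.ofList cleaned))

-- ===== PRECONDITION & SPEC =====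
def Spec_split_logical_conditions (condition_str : String) (out : List String) : Prop := out = split_logical_conditions_alt condition_str
instance (condition_str : String) (out : List String) : Decidable (Spec_split_logical_conditions condition_str out) := by unfold Spec_split_logical_conditions; infer_instance

-- ===== CLAIM (what is proved, stated in full; the proofs are below) =====
def Claim_equal_split_logical_conditions : Prop := ∀ (condition_str : String), Dom_split_logical_conditions condition_str → Spec_split_logical_conditions condition_str (split_logical_conditions condition_str)

-- ===== LEMMAS AND PROOFS =====

-- cleaning step shared by both reshapings
def cleanOpt (p : List Char) : Option String :=
  let cleaned := PySem.Chars.join [' '] (PySem.Chars.split₀ p)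
  if cleaned = [] then none else some (String.ofList cleaned)

-- structural form of splitOn for a two-character separator
def sp2 (a b : Char) : List Char → List (List Char)
  | [] => [[]]
  | c1 :: rest =>
    match rest with
    | c2 :: rest' =>
      if c1 = a ∧ c2 = b then [] :: sp2 a b rest'
      else (sp2 a b (c2 :: rest')).modifyHead (c1 :: ·)
    | [] => [[c1]]
termination_by l => l.length

-- combined one-pass split on '||' and '&&'
def P2 : List Char → List (List Char)
  | [] => [[]]
  | c1 :: rest =>
    match rest with
    | c2 :: rest' =>
      if (c1 = '|' ∧ c2 = '|') ∨ (c1 = '&' ∧ c2 = '&') then [] :: P2 rest'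
      else (P2 (c2 :: rest')).modifyHead (c1 :: ·)
    | [] => [[c1]]
termination_by l => l.length

theorem sp2_ne_nil (a b : Char) (l : List Char) : sp2 a b l ≠ [] := by
  match l with
  | [] => simp [sp2]
  | [c] => simp [sp2]
  | c1 :: c2 :: rest =>
    rw [sp2]
    split
    · simp
    · cases h : sp2 a b (c2 :: rest) with
      | nil => exact absurd h (sp2_ne_nil a b (c2 :: rest))
      | cons x xs => simp
termination_by l.length

theorem P2_ne_nil (l : List Char) : P2 l ≠ [] := by
  match l with
  | [] => simp [P2]
  | [c] => simp [P2]
  | c1 :: c2 :: rest =>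
    rw [P2]
    split
    · simp
    · cases h : P2 (c2 :: rest) with
      | nil => exact absurd h (P2_ne_nil (c2 :: rest))
      | cons x xs => simp
termination_by l.length

theorem splitOn_go_eq (a b : Char) (fuel : Nat) :
    ∀ (l cur : List Char) (acc : List (List Char)), l.length < fuel →
      PySem.Chars.splitOn.go [a, b] fuel l cur acc
        = acc.reverse ++ (sp2 a b l).modifyHead (cur.reverse ++ ·) := by
  induction fuel with
  | zero => intro l cur acc h; omega
  | succ n ih =>
    intro l cur acc h
    match l with
    | [] => simp [PySem.Chars.splitOn.go, sp2]
    | c1 :: rest =>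
      rw [PySem.Chars.splitOn.go]
      by_cases hp : List.isPrefixOf [a, b] (c1 :: rest) = true
      · obtain ⟨c2, rest', rfl⟩ : ∃ c2 rest', rest = c2 :: rest' := by
          cases rest with
          | nil => simp [List.isPrefixOf] at hp
          | cons c2 rest' => exact ⟨c2, rest', rfl⟩
        have hab : a = c1 ∧ b = c2 := by simpa [List.isPrefixOf] using hp
        obtain ⟨rfl, rfl⟩ := hab
        simp only [hp, if_pos]
        rw [show List.drop (List.length [a, b]) (a :: b :: rest') = rest' from rfl]
        rw [ih rest' [] (cur.reverse :: acc) (by simp at h ⊢; omega)]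
        rw [sp2, if_pos ⟨rfl, rfl⟩]
        simp only [List.modifyHead, List.reverse_cons, List.append_assoc, List.reverse_nil,
          List.nil_append, List.singleton_append]
        cases sp2 a b rest' <;> simp
      · rw [if_neg (by simpa using hp)]
        rw [ih rest (c1 :: cur) acc (by simp at h ⊢; omega)]
        match rest with
        | [] => simp [sp2]
        | c2 :: rest' =>
          rw [sp2]
          rw [if_neg (by rintro ⟨rfl, rfl⟩; simp [List.isPrefixOf] at hp)]
          cases hsp : sp2 a b (c2 :: rest') with
          | nil => exact absurd hsp (sp2_ne_nil a b (c2 :: rest'))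
          | cons x xs => simp

theorem splitOn_eq_sp2 (a b : Char) (l : List Char) :
    PySem.Chars.splitOn l [a, b] = sp2 a b l := by
  rw [PySem.Chars.splitOn, splitOn_go_eq a b (l.length + 1) l [] [] (by omega)]
  cases h : sp2 a b l with
  | nil => exact absurd h (sp2_ne_nil a b l)
  | cons x xs => simp

-- the one-pass split is A's nested split, flattened
theorem P2_eq_flat (l : List Char) :
    P2 l = (sp2 '|' '|' l).flatMap (fun p => sp2 '&' '&' p) := by
  match l with
  | [] => simp [P2, sp2]
  | [c] => simp [P2, sp2]
  | c1 :: c2 :: rest =>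
    by_cases hor : c1 = '|' ∧ c2 = '|'
    · obtain ⟨rfl, rfl⟩ := hor
      rw [P2, if_pos (Or.inl ⟨rfl, rfl⟩), sp2, if_pos ⟨rfl, rfl⟩]
      simp [P2_eq_flat rest, sp2]
    · by_cases hand : c1 = '&' ∧ c2 = '&'
      · obtain ⟨rfl, rfl⟩ := hand
        rw [P2, if_pos (Or.inr ⟨rfl, rfl⟩)]
        rw [sp2, if_neg (by simp)]
        match rest with
        | [] => simp [sp2, P2]
        | d :: rest' =>
          rw [sp2, if_neg (by simp)]
          cases hsp : sp2 '|' '|' (d :: rest') with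
          | nil => exact absurd hsp (sp2_ne_nil '|' '|' (d :: rest'))
          | cons y ys =>
            simp only [List.modifyHead, List.flatMap_cons]
            rw [sp2, if_pos ⟨rfl, rfl⟩]
            rw [P2_eq_flat (d :: rest'), hsp]
            simp
      · conv_lhs => rw [P2, if_neg (by tauto)]
        conv_rhs => rw [sp2, if_neg hor]
        match rest with
        | [] =>
          rw [sp2, P2]
          simp only [List.modifyHead, List.flatMap_cons, List.flatMap_nil, List.append_nil]
          rw [sp2, if_neg hand, sp2]
          simp
        | d :: rest' =>
          by_cases hsep : c2 = '|' ∧ d = '|'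
          · obtain ⟨rfl, rfl⟩ := hsep
            rw [sp2, if_pos ⟨rfl, rfl⟩, P2, if_pos (Or.inl ⟨rfl, rfl⟩)]
            simp only [List.modifyHead, List.flatMap_cons]
            rw [show sp2 '&' '&' [c1] = [[c1]] from by rw [sp2]]
            rw [P2_eq_flat rest']
            simp
          · rw [sp2, if_neg hsep]
            cases hsp : sp2 '|' '|' (d :: rest') with
            | nil => exact absurd hsp (sp2_ne_nil '|' '|' (d :: rest'))
            | cons y ys =>
              simp only [List.modifyHead, List.flatMap_cons]
              rw [show sp2 '&' '&' (c1 :: c2 :: y) = (sp2 '&' '&' (c2 :: y)).modifyHead (c1 :: ·) from by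
                rw [sp2, if_neg hand]]
              rw [P2_eq_flat (c2 :: d :: rest')]
              rw [show sp2 '|' '|' (c2 :: d :: rest') = (c2 :: y) :: ys from by
                rw [sp2, if_neg hsep, hsp]; simp [List.modifyHead]]
              simp only [List.flatMap_cons]
              cases hsa : sp2 '&' '&' (c2 :: y) with
              | nil => exact absurd hsa (sp2_ne_nil '&' '&' (c2 :: y))
              | cons z zs => simp [List.modifyHead]
termination_by l.length

-- relating B's scanner to the one-pass split
theorem scanPieces_eq (l : List Char) :
    ∀ (cur : List Char) (pieces : List (List Char)),
      scanPieces l cur pieces = pieces ++ (P2 l).modifyHead (cur ++ ·) := by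
  match l with
  | [] => intro cur pieces; simp [scanPieces, P2]
  | [c] => intro cur pieces; simp [scanPieces, P2, List.modifyHead]
  | c1 :: c2 :: rest =>
    intro cur pieces
    rw [scanPieces, P2]
    split
    · rw [scanPieces_eq rest [] (pieces ++ [cur])]
      cases P2 rest <;> simp [List.modifyHead]
    · rw [scanPieces_eq (c2 :: rest) (cur ++ [c1]) pieces]
      cases hp : P2 (c2 :: rest) with
      | nil => exact absurd hp (P2_ne_nil (c2 :: rest))
      | cons x xs => simp [List.modifyHead]
termination_by l.length

-- A's inner loop ('if cleaned: out.append(cleaned)') is a filterMap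
theorem foldl_inner (L : List (List Char)) :
    ∀ (acc : List String),
      L.foldl (fun sub_conditions part =>
        let cleaned_part := PySem.Chars.join [' '] (PySem.Chars.split₀ part)
        if cleaned_part ≠ [] then sub_conditions ++ [String.ofList cleaned_part]
        else sub_conditions) acc
      = acc ++ L.filterMap cleanOpt := by
  induction L with
  | nil => intro acc; simp
  | cons p L ih =>
    intro acc
    simp only [List.foldl_cons, List.filterMap_cons]
    by_cases h : PySem.Chars.join [' '] (PySem.Chars.split₀ p) = []
    · rw [if_neg (by simpa using h), ih]
      simp [cleanOpt, h]
    · rw [if_pos (by simpa using h), ih]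
      simp [cleanOpt, h]

theorem foldl_outer (OrL : List (List Char)) :
    ∀ (acc : List String),
      OrL.foldl (fun sub_conditions or_part =>
        (PySem.Chars.splitOn or_part ['&', '&']).foldl (fun sub_conditions part =>
          let cleaned_part := PySem.Chars.join [' '] (PySem.Chars.split₀ part)
          if cleaned_part ≠ [] then sub_conditions ++ [String.ofList cleaned_part]
          else sub_conditions) sub_conditions) acc
      = acc ++ (OrL.flatMap (fun orp => sp2 '&' '&' orp)).filterMap cleanOpt := by
  induction OrL with
  | nil => intro acc; simp
  | cons orp OrL ih =>
    intro acc
    simp only [List.foldl_cons, List.flatMap_cons, List.filterMap_append]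
    rw [foldl_inner, ih, splitOn_eq_sp2]
    simp

-- ===== VERDICT (by name: the statement is the Claim_ definition above) =====
theorem split_logical_conditions_spec : Claim_equal_split_logical_conditions := by
  intro s _
  show split_logical_conditions s = split_logical_conditions_alt s
  rw [split_logical_conditions, split_logical_conditions_alt]
  rw [foldl_outer, splitOn_eq_sp2, ← P2_eq_flat, scanPieces_eq]
  cases hp : P2 s.toList with
  | nil => exact absurd hp (P2_ne_nil s.toList)
  | cons x xs => simp [List.modifyHead, cleanOpt]
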